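-- pv_equiv track=rewrite | github.com/abolfazlkp77/hw10gp3 | maghsom.py | taghsim
-- ===== SOURCE A (Python) =====
-- def taghsim(m,n):
--     list1=[]
--     list2=[]
--     list3=[]
--     for i in range (m,1,-1):
--         if m%i==0:
--             list1.append(i)
--
--     for j in range (n,1,-1):
--         if n%j==0:
--             list2.append(j)
--
--     for i in list1:
--         if i in list2:
--             list3.append(i)
--     return list3
-- ===== SOURCE B (Python) =====
-- def taghsim(m, n):
--     # common divisors of m and n, descending, excluding 1:
--     # take g = gcd(m, n) (Euclid), then enumerate divisor pairs of g up to sqrt(g)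
--     if m < 2 or n < 2:
--         return []
--     a, b = m, n
--     while b:
--         a, b = b, a % b
--     g = a
--     lo = []
--     hi = []
--     d = 1
--     while d * d <= g:
--         if g % d == 0:
--             if d > 1:
--                 lo.append(d)
--             q = g // d
--             if q != d and q > 1:
--                 hi.append(q)
--         d += 1
--     lo.reverse()
--     return hi + lo
-- ===== Notes on version B (the rewrite author's own statement) =====
-- stated objective: faster
-- what changed: Instead of enumerating all divisors of m and of n over two full countdown ranges and intersecting the lists, B computes g = gcd(m,n) by Euclid's algorithm and enumerates the divisor pairs (d, g//d) of g by trial division up to sqrt(g), emitting them in descending order.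
import Mathlib
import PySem

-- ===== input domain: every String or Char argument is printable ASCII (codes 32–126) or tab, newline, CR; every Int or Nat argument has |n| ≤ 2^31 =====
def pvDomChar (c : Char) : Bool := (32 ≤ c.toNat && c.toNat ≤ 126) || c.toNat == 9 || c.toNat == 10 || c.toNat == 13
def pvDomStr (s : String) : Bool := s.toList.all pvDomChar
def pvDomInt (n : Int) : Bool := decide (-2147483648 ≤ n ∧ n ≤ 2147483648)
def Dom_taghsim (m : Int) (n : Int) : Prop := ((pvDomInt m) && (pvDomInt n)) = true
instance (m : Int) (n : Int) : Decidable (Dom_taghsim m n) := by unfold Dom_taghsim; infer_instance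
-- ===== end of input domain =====

-- B replaces A's "list all divisors of m, all divisors of n, intersect" with
-- "gcd by Euclid, then divisor pairs of the gcd by trial division up to its square root" (faster).

-- ===== PORT A =====
def taghsim (m : Int) (n : Int) : List Int :=
  let list1 := (PySem.List.pyRange m 1 (-1)).foldl
    (fun acc i => if PySem.Int.mod m i == 0 then acc ++ [i] else acc) []
  let list2 := (PySem.List.pyRange n 1 (-1)).foldl
    (fun acc j => if PySem.Int.mod n j == 0 then acc ++ [j] else acc) []
  let list3 := list1.foldl
    (fun acc i => if i ∈ list2 then acc ++ [i] else acc) []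
  list3

-- ===== PORT B =====
-- termination fact for the Euclid loop: the floor-mod strictly shrinks in absolute value
theorem pvModNatAbsLt (a b : Int) (hb : ¬ b = 0) : (PySem.Int.mod a b).natAbs < b.natAbs := by
  rcases lt_or_gt_of_ne hb with h | h
  · have := PySem.Int.mod_neg_bounds a h; omega
  · have h1 := PySem.Int.mod_nonneg a h; have h2 := PySem.Int.mod_lt a h; omega

-- `while b: a, b = b, a % b`
def euclidLoop (a b : Int) : Int :=
  if h : b = 0 then a else euclidLoop b (PySem.Int.mod a b)
termination_by b.natAbs
decreasing_by exact pvModNatAbsLt a b h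

-- termination fact for the trial-division loop: `d*d ≤ g` bounds `d` by `g`
theorem pvTrialDec (g d : Int) (h : d * d ≤ g) : (g + 1 - (d + 1)).toNat < (g + 1 - d).toNat := by
  have hd : d ≤ g := by nlinarith [sq_nonneg d, sq_nonneg (d - 1)]
  omega

-- `while d*d <= g: …`
def trialLoop (g : Int) (d : Int) (lo : List Int) (hi : List Int) : List Int :=
  if h : d * d ≤ g then
    if PySem.Int.mod g d == 0 then
      let lo' := if 1 < d then lo ++ [d] else lo
      let q := PySem.Int.floordiv g d
      let hi' := if q ≠ d ∧ 1 < q then hi ++ [q] else hi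
      trialLoop g (d + 1) lo' hi'
    else
      trialLoop g (d + 1) lo hi
  else
    hi ++ lo.reverse
termination_by (g + 1 - d).toNat
decreasing_by
  · exact pvTrialDec g d h
  · exact pvTrialDec g d h

def taghsim_alt (m : Int) (n : Int) : List Int :=
  if m < 2 ∨ n < 2 then []
  else trialLoop (euclidLoop m n) 1 [] []

-- ===== PRECONDITION & SPEC =====
def Spec_taghsim (m : Int) (n : Int) (out : List Int) : Prop := out = taghsim_alt m n
instance (m : Int) (n : Int) (out : List Int) : Decidable (Spec_taghsim m n out) := by unfold Spec_taghsim; infer_instance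

-- ===== CLAIM (what is proved, stated in full; the proofs are below) =====
def Claim_equal_taghsim : Prop := ∀ (m : Int) (n : Int), Dom_taghsim m n → Spec_taghsim m n (taghsim m n)

-- ===== LEMMAS AND PROOFS =====

-- two strictly increasing lists with the same members are equal
theorem pvAscUnique (l1 l2 : List Int) (h1 : l1.Pairwise (· < ·)) (h2 : l2.Pairwise (· < ·))
    (h : ∀ x, x ∈ l1 ↔ x ∈ l2) : l1 = l2 := by
  have hp := (List.perm_ext_iff_of_nodup (h1.imp ne_of_lt) (h2.imp ne_of_lt)).mpr h
  exact hp.eq_of_pairwise (fun _ _ _ _ x y => absurd y (lt_asymm x)) h1 h2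

-- the Euclid loop returns a positive result …
theorem euclidLoop_pos (a b : Int) (ha : 0 < a) (hb : 0 ≤ b) : 0 < euclidLoop a b := by
  fun_induction euclidLoop a b with
  | case1 a => exact ha
  | case2 a b h ih =>
    exact ih (lt_of_le_of_ne hb (Ne.symm h)) (PySem.Int.mod_nonneg a (lt_of_le_of_ne hb (Ne.symm h)))

-- divisibility passes through the floor-mod
theorem pvDvdMod (a b x : Int) (hx : x ∣ b) : (x ∣ PySem.Int.mod a b) ↔ x ∣ a := by
  show (x ∣ Int.fmod a b) ↔ _
  rw [Int.fmod_def]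
  exact dvd_sub_left (hx.mul_right _)

-- … whose divisors are exactly the common divisors of the arguments
theorem euclidLoop_dvd_iff (a b x : Int) : x ∣ euclidLoop a b ↔ x ∣ a ∧ x ∣ b := by
  fun_induction euclidLoop a b with
  | case1 a => simp
  | case2 a b h ih =>
    rw [ih]
    constructor
    · rintro ⟨hxb, hxm⟩
      exact ⟨(pvDvdMod a b x hxb).mp hxm, hxb⟩
    · rintro ⟨hxa, hxb⟩
      exact ⟨hxb, (pvDvdMod a b x hxb).mpr hxa⟩

-- the ascending list of the divisors of g in [2, g]
def pvDivs (g : Int) : List Int :=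
  (PySem.List.pyRange 2 (g + 1) 1).filter (fun e => decide (e ∣ g))

-- two strictly decreasing lists with the same members are equal
theorem pvDescUnique (l1 l2 : List Int) (h1 : l1.Pairwise (· > ·)) (h2 : l2.Pairwise (· > ·))
    (h : ∀ x, x ∈ l1 ↔ x ∈ l2) : l1 = l2 := by
  have := pvAscUnique l1.reverse l2.reverse (List.pairwise_reverse.mpr h1)
    (List.pairwise_reverse.mpr h2) (by simpa using h)
  simpa using congrArg List.reverse this

-- the countdown range is strictly decreasing
theorem pvRangeDesc (a b : Int) : (PySem.List.pyRange a b (-1)).Pairwise (· > ·) := by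
  rw [PySem.List.pyRange_neg_one_eq_reverse]
  exact List.pairwise_reverse.mpr (PySem.List.pairwise_lt_pyRange_one _ _)

theorem pvDivs_pairwise (g : Int) : (pvDivs g).Pairwise (· < ·) :=
  (PySem.List.pairwise_lt_pyRange_one 2 (g + 1)).filter _

theorem pvDivs_mem (g : Int) (hg : 1 ≤ g) (x : Int) : x ∈ pvDivs g ↔ 1 < x ∧ x ∣ g := by
  simp only [pvDivs, List.mem_filter, PySem.List.mem_pyRange_one, decide_eq_true_eq]
  constructor
  · rintro ⟨⟨h2, _⟩, hd⟩; exact ⟨by omega, hd⟩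
  · rintro ⟨h2, hd⟩
    exact ⟨⟨by omega, by have := Int.le_of_dvd hg hd; omega⟩, hd⟩

-- the complementary divisor g/e is antitone in e
theorem pvCompLt (g a b fa fb : Int) (ha : 1 ≤ a) (hab : a < b) (hg : 1 ≤ g)
    (hga : fa * a = g) (hgb : fb * b = g) : fb < fa := by
  have hfa : 1 ≤ fa := by by_contra hcon; push_neg at hcon; nlinarith
  by_contra hcon
  push_neg at hcon
  have h2 : fa * b ≤ g := by
    nlinarith [mul_le_mul_of_nonneg_right hcon (show (0:ℤ) ≤ b by omega)]
  nlinarith [mul_pos (show (0:ℤ) < fa by omega) (show (0:ℤ) < b - a by omega), hga]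

-- main invariant of the trial-division loop
theorem trialLoop_inv (g : Int) (hg : 1 ≤ g) (d : Int) (lo hi : List Int)
    (hd : 1 ≤ d) (hprev : d = 1 ∨ (d - 1) * (d - 1) ≤ g)
    (hlo : lo = (PySem.List.pyRange 2 d 1).filter (fun e => decide (e ∣ g)))
    (hhi : hi = ((PySem.List.pyRange 1 d 1).filter
        (fun e => decide (e ∣ g ∧ e * e < g))).map (fun e => PySem.Int.floordiv g e)) :
    trialLoop g d lo hi = (pvDivs g).reverse := by
  fun_induction trialLoop g d lo hi with
  | case1 d lo hi h hq lo' q hi' ih =>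
    have hdvd : d ∣ g := by
      rw [← PySem.Int.mod_eq_zero_iff_dvd]; exact beq_iff_eq.mp hq
    have hqd : q * d = g := by
      show PySem.Int.floordiv g d * d = g
      rw [PySem.Int.floordiv_eq_ediv_of_pos (by omega)]
      exact Int.ediv_mul_cancel hdvd
    apply ih (by omega) (Or.inr (by simpa using h))
    · -- the lo accumulator after this step
      show lo' = _
      rcases eq_or_lt_of_le hd with hd1 | hd2
      · have : lo' = lo := by simp [lo', ← hd1]
        rw [this, hlo, PySem.List.pyRange_one_eq_nil (a := 2) (by omega),
          PySem.List.pyRange_one_eq_nil (a := 2) (by omega)]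
      · have : lo' = lo ++ [d] := by simp [lo', hd2]
        rw [this, hlo, PySem.List.pyRange_one_succ_right (by omega : (2:Int) ≤ d),
          List.filter_append]
        simp [hdvd]
    · -- the hi accumulator after this step
      show hi' = _
      rw [PySem.List.pyRange_one_succ_right (by omega : (1:Int) ≤ d), List.filter_append,
        List.map_append, ← hhi]
      rcases eq_or_lt_of_le h with hsq | hsq
      · have hqeq : q = d := by nlinarith
        have : hi' = hi := by simp [hi', hqeq]
        rw [this]
        have : ¬ (d ∣ g ∧ d * d < g) := by rintro ⟨_, hc⟩; omega
        simp [this]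
      · have hqgt : d < q := by nlinarith
        have : hi' = hi ++ [q] := by
          simp only [hi']
          rw [dif_pos (show ¬ q = d ∧ 1 < q from ⟨by omega, by omega⟩)]
        rw [this]
        simp only [hdvd, hsq, and_self, decide_true, List.filter_cons, List.filter_nil,
          if_true, List.map_cons, List.map_nil, List.append_cancel_left_eq, List.cons.injEq,
          and_true]
        rfl
  | case2 d lo hi h hq ih =>
    have hndvd : ¬ d ∣ g := by
      rw [← PySem.Int.mod_eq_zero_iff_dvd]; simpa using hq
    have hd2 : 2 ≤ d := by
      rcases eq_or_lt_of_le hd with hd1 | hd2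
      · exact absurd (hd1 ▸ one_dvd g) hndvd
      · omega
    apply ih (by omega) (Or.inr (by simpa using h))
    · rw [hlo, PySem.List.pyRange_one_succ_right (by omega : (2:Int) ≤ d),
        List.filter_append]
      simp [hndvd]
    · rw [hhi, PySem.List.pyRange_one_succ_right (by omega : (1:Int) ≤ d), List.filter_append]
      have : ¬ (d ∣ g ∧ d * d < g) := by rintro ⟨hc, _⟩; exact hndvd hc
      simp [this]
  | case3 d lo hi h =>
    have hd2 : 2 ≤ d := by
      rcases eq_or_lt_of_le hd with hd1 | hd2
      · exfalso; rw [← hd1] at h; omega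
      · omega
    have hsq : (d - 1) * (d - 1) ≤ g := by
      rcases hprev with h1 | h1
      · omega
      · exact h1
    have hlt : g < d * d := by omega
    have key : lo ++ hi.reverse = pvDivs g := by
      apply pvAscUnique
      · -- the concatenation is strictly increasing
        rw [List.pairwise_append]
        refine ⟨hlo ▸ (PySem.List.pairwise_lt_pyRange_one _ _).filter _, ?_, ?_⟩
        · rw [List.pairwise_reverse]
          rw [hhi, List.pairwise_map]
          apply List.Pairwise.imp_of_mem ?_
            ((PySem.List.pairwise_lt_pyRange_one 1 d).filter
              (fun e => decide (e ∣ g ∧ e * e < g)))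
          intro a b ha hb hab
          simp only [List.mem_filter, PySem.List.mem_pyRange_one, decide_eq_true_eq] at ha hb
          obtain ⟨⟨ha1, _⟩, hda, _⟩ := ha
          obtain ⟨⟨hb1, _⟩, hdb, _⟩ := hb
          have hga : PySem.Int.floordiv g a * a = g := by
            rw [PySem.Int.floordiv_eq_ediv_of_pos (by omega)]
            exact Int.ediv_mul_cancel hda
          have hgb : PySem.Int.floordiv g b * b = g := by
            rw [PySem.Int.floordiv_eq_ediv_of_pos (by omega)]
            exact Int.ediv_mul_cancel hdb
          exact pvCompLt g a b _ _ ha1 hab hg hga hgb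
        · -- every element of lo is below every element of hi
          intro a ha b hb
          rw [hlo] at ha
          rw [List.mem_reverse, hhi] at hb
          simp only [List.mem_filter, PySem.List.mem_pyRange_one, decide_eq_true_eq,
            List.mem_map] at ha hb
          obtain ⟨⟨ha2, had⟩, hda⟩ := ha
          obtain ⟨e, ⟨⟨he1, _⟩, hde, hee⟩, hbe⟩ := hb
          have hge : PySem.Int.floordiv g e * e = g := by
            rw [PySem.Int.floordiv_eq_ediv_of_pos (by omega)]
            exact Int.ediv_mul_cancel hde
          rw [← hbe] at *
          nlinarith [hge]
      · exact pvDivs_pairwise g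
      · -- membership
        intro x
        rw [List.mem_append, List.mem_reverse, pvDivs_mem g hg x, hlo, hhi]
        simp only [List.mem_filter, PySem.List.mem_pyRange_one, decide_eq_true_eq,
          List.mem_map]
        constructor
        · rintro (⟨⟨hx2, _⟩, hdx⟩ | ⟨e, ⟨⟨he1, _⟩, hde, hee⟩, hxe⟩)
          · exact ⟨by omega, hdx⟩
          · have hge : PySem.Int.floordiv g e * e = g := by
              rw [PySem.Int.floordiv_eq_ediv_of_pos (by omega)]
              exact Int.ediv_mul_cancel hde
            rw [← hxe]
            constructor
            · nlinarith [hge]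
            · exact ⟨e, by linarith [hge]⟩
        · rintro ⟨hx1, hdx⟩
          have hxg : x ≤ g := Int.le_of_dvd (by omega) hdx
          by_cases hxx : x * x ≤ g
          · exact Or.inl ⟨⟨by omega, by nlinarith⟩, hdx⟩
          · obtain ⟨c, hc⟩ := hdx
            have hc1 : 1 ≤ c := by by_contra hcon; push_neg at hcon; nlinarith
            have hcx : c < x := by by_contra hcon; push_neg at hcon; nlinarith
            have hccg : c * c < g :=
              calc c * c < x * c := mul_lt_mul_of_pos_right hcx (by omega)
              _ = g := hc.symm
            have hcd : c < d := by
              by_contra hcon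
              push_neg at hcon
              nlinarith [mul_le_mul hcon hcon (by omega : (0:ℤ) ≤ d) (by omega : (0:ℤ) ≤ c)]
            refine Or.inr ⟨c, ⟨⟨hc1, hcd⟩, ⟨x, by rw [hc]; ring⟩, hccg⟩, ?_⟩
            rw [PySem.Int.floordiv_eq_ediv_of_pos (by omega), hc,
              Int.mul_ediv_cancel x (by omega)]
    calc hi ++ lo.reverse = (lo ++ hi.reverse).reverse := by simp
    _ = (pvDivs g).reverse := by rw [key]

-- B's closed form on the main branch
theorem taghsim_alt_eq (m n : Int) (hm : 2 ≤ m) (hn : 2 ≤ n) :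
    taghsim_alt m n = (pvDivs (euclidLoop m n)).reverse := by
  rw [taghsim_alt, if_neg (by omega)]
  exact trialLoop_inv (euclidLoop m n) (euclidLoop_pos m n (by omega) (by omega)) 1 [] []
    (by omega) (Or.inl rfl)
    (by rw [PySem.List.pyRange_one_eq_nil (by omega)]; rfl)
    (by rw [PySem.List.pyRange_one_eq_nil (by omega)]; rfl)

-- A's loops are filters of the countdown ranges
theorem taghsim_filter (m n : Int) :
    taghsim m n = ((PySem.List.pyRange m 1 (-1)).filter
        (fun i => PySem.Int.mod m i == 0)).filter
      (fun i => decide (i ∈ (PySem.List.pyRange n 1 (-1)).filter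
        (fun j => PySem.Int.mod n j == 0))) := by
  unfold taghsim
  simp only [PySem.List.foldl_append_if_eq_filter, PySem.List.foldl_append_ite_eq_filter,
    List.nil_append]

-- A's closed form on the main branch
theorem taghsim_eq (m n : Int) (hm : 2 ≤ m) (hn : 2 ≤ n) :
    taghsim m n = (pvDivs (euclidLoop m n)).reverse := by
  have hg : 0 < euclidLoop m n := euclidLoop_pos m n (by omega) (by omega)
  rw [taghsim_filter]
  apply pvDescUnique _ _ (((pvRangeDesc m 1).filter _).filter _)
    (List.pairwise_reverse.mpr ((pvDivs_pairwise _).imp (fun hab => hab)))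
  intro x
  rw [List.mem_reverse, pvDivs_mem _ (by omega) x]
  simp only [List.mem_filter, PySem.List.mem_pyRange_neg_one,
    beq_iff_eq, PySem.Int.mod_eq_zero_iff_dvd, decide_eq_true_eq, euclidLoop_dvd_iff]
  constructor
  · rintro ⟨⟨⟨_, _⟩, hdm⟩, ⟨_, _⟩, hdn⟩
    exact ⟨by omega, hdm, hdn⟩
  · rintro ⟨hx1, hdm, hdn⟩
    have h1 := Int.le_of_dvd (by omega) hdm
    have h2 := Int.le_of_dvd (by omega) hdn
    exact ⟨⟨⟨by omega, by omega⟩, hdm⟩, ⟨by omega, by omega⟩, hdn⟩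

-- A returns [] as soon as one argument is below 2
theorem taghsim_nil (m n : Int) (h : m < 2 ∨ n < 2) : taghsim m n = [] := by
  rw [taghsim_filter]
  rcases h with h | h
  · rw [PySem.List.pyRange_neg_one_eq_nil (a := m) (by omega)]
    rfl
  · rw [PySem.List.pyRange_neg_one_eq_nil (a := n) (by omega)]
    simp

-- ===== VERDICT (by name: the statement is the Claim_ definition above) =====
theorem taghsim_spec : Claim_equal_taghsim := by
  intro m n _
  unfold Spec_taghsim
  by_cases h : m < 2 ∨ n < 2
  · rw [taghsim_nil m n h, taghsim_alt, if_pos h]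
  · push_neg at h
    rw [taghsim_eq m n h.1 h.2, taghsim_alt_eq m n h.1 h.2]
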